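-- pv_equiv track=rewrite | github.com/AlibabaPAI/llumnix | llumnix/global_scheduler/dispatch_policy.py | _calc_instance_prefix_hit_count
-- ===== SOURCE A (Python) =====
-- def _calc_instance_prefix_hit_count(prefix_hashes, prefix_hash_hit_info):
--     """
--     Count the number of prefix chunks hit by each instance.
--
--     Only consider prefix hits: if a chunk is not hit, subsequent chunks will not be counted even if they are hit.
--
--     :param prefix_hashes: List of prefix hashes
--     :param prefix_hash_hit_info: {prefix_hash: [instance_id_0, instance_id_1, ...], ...}
--     :return: {instance_id: number of hit chunks}
--     """
--     instance_prefix_hit_count = {}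
--     instance_broken = {}
--
--     for _, prefix_hash in enumerate(prefix_hashes):
--         hit_instance_ids = prefix_hash_hit_info.get(prefix_hash, [])
--         for instance_id in hit_instance_ids:
--             if not instance_broken.get(instance_id, False):
--                 instance_prefix_hit_count[instance_id] = instance_prefix_hit_count.get(instance_id, 0) + 1
--         for instance_id in instance_prefix_hit_count:
--             if instance_id not in hit_instance_ids:
--                 instance_broken[instance_id] = True
--     return instance_prefix_hit_count
-- ===== SOURCE B (Python) =====
-- def _calc_instance_prefix_hit_count(prefix_hashes, prefix_hash_hit_info):
--     """Per-instance closed form: an instance's total is the number of its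
--     occurrences in the consecutive run of chunks containing it that starts at
--     its first appearance; computed by a forward scan at first sight of each id,
--     with no broken/active state carried between chunks."""
--     hit_lists = [prefix_hash_hit_info.get(h, []) for h in prefix_hashes]
--     result = {}
--     for i, lst in enumerate(hit_lists):
--         for instance_id in lst:
--             if instance_id not in result:
--                 # count this id's occurrences over its initial consecutive run
--                 n = 0
--                 j = i
--                 while j < len(hit_lists) and instance_id in hit_lists[j]:
--                     n += hit_lists[j].count(instance_id)
--                     j += 1
--                 result[instance_id] = n
--     return result
-- ===== Notes on version B (the rewrite author's own statement) =====
-- stated objective: faster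
-- what changed: Replaces A's chunk-by-chunk stateful sweep (count dict plus a broken-flag dict maintained by rescanning every counted instance against each chunk's hit list) by a per-instance closed form: at an instance's first appearance one forward scan over the consecutive run of chunks containing it sums its occurrences, so no broken/active state exists and A's per-chunk rescan of all counted instances disappears.
import Mathlib
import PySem

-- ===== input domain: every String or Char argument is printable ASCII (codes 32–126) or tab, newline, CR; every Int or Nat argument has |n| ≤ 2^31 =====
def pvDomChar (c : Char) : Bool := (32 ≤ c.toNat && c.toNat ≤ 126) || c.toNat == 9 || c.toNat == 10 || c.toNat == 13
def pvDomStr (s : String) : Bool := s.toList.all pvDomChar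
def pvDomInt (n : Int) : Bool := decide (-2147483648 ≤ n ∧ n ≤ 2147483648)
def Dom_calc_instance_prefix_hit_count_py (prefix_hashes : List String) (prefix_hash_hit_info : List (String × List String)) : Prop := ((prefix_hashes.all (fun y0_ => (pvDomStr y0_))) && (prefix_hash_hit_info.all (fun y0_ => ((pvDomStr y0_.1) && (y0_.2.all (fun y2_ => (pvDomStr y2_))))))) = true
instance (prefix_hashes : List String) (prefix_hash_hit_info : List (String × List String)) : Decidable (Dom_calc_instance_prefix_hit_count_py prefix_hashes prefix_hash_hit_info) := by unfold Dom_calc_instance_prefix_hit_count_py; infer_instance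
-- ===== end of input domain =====

-- B drops A's stateful pass (count dict + broken-flag dict rescanned per chunk): each instance's
-- total is computed per-instance, as its occurrences over the consecutive run of chunks containing
-- it starting at its first appearance (measured faster: no per-chunk rescan of counted instances).

-- ===== PORT A =====
-- one iteration of A's outer loop: state = (instance_prefix_hit_count, instance_broken)
def pvAStep (prefix_hash_hit_info : List (String × List String))
    (st : PySem.Dict String Int × PySem.Dict String Bool) (prefix_hash : String) :
    PySem.Dict String Int × PySem.Dict String Bool :=
  let hit_instance_ids := ((PySem.Dict.mk prefix_hash_hit_info).get? prefix_hash).getD []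
  let counts := hit_instance_ids.foldl (fun c instance_id =>
      if !(st.2.getD instance_id false) then
        c.insert instance_id (c.getD instance_id 0 + 1)
      else c) st.1
  let broken := counts.keys.foldl (fun b instance_id =>
      if instance_id ∉ hit_instance_ids then b.insert instance_id true else b) st.2
  (counts, broken)

def calc_instance_prefix_hit_count_py (prefix_hashes : List String) (prefix_hash_hit_info : List (String × List String)) : List (String × Int) :=
  (prefix_hashes.foldl (pvAStep prefix_hash_hit_info) (PySem.Dict.empty, PySem.Dict.empty)).1.items

-- ===== PORT B =====
-- Source B's inner 'while j < len and id in hit_lists[j]: n += hit_lists[j].count(id)':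
-- the scanned suffix hit_lists[j:] is the recursion argument
def pvRun (instance_id : String) : List (List String) → Int
  | [] => 0
  | l :: rest =>
    if instance_id ∈ l then (PySem.List.count l instance_id : Int) + pvRun instance_id rest
    else 0

-- Source B's outer 'for i, lst in enumerate(hit_lists)': recursion over the suffix starting at i
def pvAltGo : List (List String) → PySem.Dict String Int → PySem.Dict String Int
  | [], result => result
  | lst :: rest, result =>
    pvAltGo rest (lst.foldl (fun result instance_id =>
      if result.contains instance_id then result
      else result.insert instance_id (pvRun instance_id (lst :: rest))) result)

def calc_instance_prefix_hit_count_py_alt (prefix_hashes : List String) (prefix_hash_hit_info : List (String × List String)) : List (String × Int) :=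
  let hit_lists := prefix_hashes.map (fun h => ((PySem.Dict.mk prefix_hash_hit_info).get? h).getD [])
  (pvAltGo hit_lists PySem.Dict.empty).items

-- ===== PRECONDITION & SPEC =====
def Spec_calc_instance_prefix_hit_count_py (prefix_hashes : List String) (prefix_hash_hit_info : List (String × List String)) (out : List (String × Int)) : Prop := out = calc_instance_prefix_hit_count_py_alt prefix_hashes prefix_hash_hit_info
instance (prefix_hashes : List String) (prefix_hash_hit_info : List (String × List String)) (out : List (String × Int)) : Decidable (Spec_calc_instance_prefix_hit_count_py prefix_hashes prefix_hash_hit_info out) := by unfold Spec_calc_instance_prefix_hit_count_py; infer_instance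

-- ===== CLAIM (what is proved, stated in full; the proofs are below) =====
def Claim_equal_calc_instance_prefix_hit_count_py : Prop := ∀ (prefix_hashes : List String) (prefix_hash_hit_info : List (String × List String)), Dom_calc_instance_prefix_hit_count_py prefix_hashes prefix_hash_hit_info → Spec_calc_instance_prefix_hit_count_py prefix_hashes prefix_hash_hit_info (calc_instance_prefix_hit_count_py prefix_hashes prefix_hash_hit_info)

-- ===== LEMMAS AND PROOFS =====

-- A's step with the hit list passed explicitly (pvAStep info st ph = pvAStepL st (lookup ph))
def pvAStepL (st : PySem.Dict String Int × PySem.Dict String Bool) (hit_instance_ids : List String) :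
    PySem.Dict String Int × PySem.Dict String Bool :=
  let counts := hit_instance_ids.foldl (fun c instance_id =>
      if !(st.2.getD instance_id false) then
        c.insert instance_id (c.getD instance_id 0 + 1)
      else c) st.1
  let broken := counts.keys.foldl (fun b instance_id =>
      if instance_id ∉ hit_instance_ids then b.insert instance_id true else b) st.2
  (counts, broken)

lemma pvAStep_eq (info : List (String × List String)) :
    pvAStep info = fun st ph => pvAStepL st (((PySem.Dict.mk info).get? ph).getD []) := rfl

-- keys of A's conditional count loop: broken ids are already keys, so it is a plain update
lemma pvACount_keys (b : PySem.Dict String Bool) :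
    ∀ (l : List String) (c : PySem.Dict String Int),
      (∀ x ∈ l, b.getD x false = true → c.contains x = true) →
      (l.foldl (fun c x => if !(b.getD x false) then c.insert x (c.getD x 0 + 1) else c) c).keys
        = PySem.Set.update c.keys l := by
  intro l
  induction l with
  | nil => intro c _; simp [PySem.Set.update_nil]
  | cons x l ih =>
    intro c h
    simp only [List.foldl_cons, PySem.Set.update_cons]
    by_cases hb : b.getD x false = true
    · have hmem : x ∈ c.keys :=
        (PySem.Dict.contains_iff_mem_keys c x).mp (h x (by simp) hb)
      rw [hb]
      simp only [Bool.not_true, Bool.false_eq_true, if_false]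
      rw [PySem.Set.add_of_mem hmem]
      exact ih c (fun y hy => h y (List.mem_cons_of_mem x hy))
    · have hbf : b.getD x false = false := by
        revert hb; cases b.getD x false <;> simp
      rw [hbf]
      simp only [Bool.not_false, if_true]
      have hkeys : (c.insert x (c.getD x 0 + 1)).keys = PySem.Set.add c.keys x := by
        by_cases hc : c.contains x = true
        · rw [PySem.Dict.keys_insert_of_contains c _ hc,
            PySem.Set.add_of_mem ((PySem.Dict.contains_iff_mem_keys c x).mp hc)]
        · have hc' : c.contains x = false := by revert hc; cases c.contains x <;> simp
          rw [PySem.Dict.keys_insert_of_not_contains c _ hc',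
            PySem.Set.add_of_not_mem (fun hm =>
              by rw [(PySem.Dict.contains_iff_mem_keys c x).mpr hm] at hc'; cases hc')]
      rw [← hkeys]
      refine ih _ (fun y hy hby => ?_)
      rw [PySem.Dict.contains_insert]
      rw [h y (List.mem_cons_of_mem x hy) hby]
      simp

-- values of A's conditional count loop
lemma pvACount_getD (b : PySem.Dict String Bool) :
    ∀ (l : List String) (c : PySem.Dict String Int) (id : String),
      (l.foldl (fun c x => if !(b.getD x false) then c.insert x (c.getD x 0 + 1) else c) c).getD id 0
        = c.getD id 0 + (if b.getD id false = true then 0 else (PySem.List.count l id : Int)) := by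
  intro l
  induction l with
  | nil => intro c id; simp [PySem.List.count]
  | cons x l ih =>
    intro c id
    simp only [List.foldl_cons]
    by_cases hb : b.getD x false = true
    · rw [hb]
      simp only [Bool.not_true, Bool.false_eq_true, if_false, ih]
      by_cases hid : id = x
      · subst hid; simp [hb]
      · by_cases hbid : b.getD id false = true
        · simp [hbid]
        · simp only [hbid]
          simp [PySem.List.count, Ne.symm hid]
    · have hbf : b.getD x false = false := by
        revert hb; cases b.getD x false <;> simp
      rw [hbf]
      simp only [Bool.not_false, if_true, ih]
      rw [PySem.Dict.getD_insert]
      by_cases hid : id = x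
      · subst hid
        simp [hbf, PySem.List.count]
        ring
      · simp only [hid, if_false]
        by_cases hbid : b.getD id false = true
        · simp [hbid]
        · simp only [hbid]
          simp [PySem.List.count, Ne.symm hid]

-- getD over A's "mark broken" loop
lemma pvBrokenFold_getD (hit : List String) :
    ∀ (xs : List String) (b : PySem.Dict String Bool) (id : String),
      (xs.foldl (fun b instance_id =>
        if instance_id ∉ hit then b.insert instance_id true else b) b).getD id false = true ↔
      ((id ∈ xs ∧ id ∉ hit) ∨ b.getD id false = true) := by
  intro xs
  induction xs with
  | nil => intro b id; simp
  | cons x xs ih =>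
    intro b id
    simp only [List.foldl_cons]
    by_cases hx : x ∈ hit
    · simp only [hx, not_true_eq_false, if_false, ih]
      by_cases hid : id = x
      · subst hid; simp [hx]
      · simp [hid]
    · simp only [hx, not_false_eq_true, if_true, ih, PySem.Dict.getD_insert]
      by_cases hid : id = x
      · subst hid; simp [hx]
      · simp [hid]

-- keys of B's insert-if-new loop
lemma pvBIns_keys (L0 : List (List String)) :
    ∀ (l : List String) (res : PySem.Dict String Int),
      (l.foldl (fun res id => if res.contains id then res else res.insert id (pvRun id L0)) res).keys
        = PySem.Set.update res.keys l := by
  intro l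
  induction l with
  | nil => intro res; simp [PySem.Set.update_nil]
  | cons x l ih =>
    intro res
    simp only [List.foldl_cons, PySem.Set.update_cons]
    by_cases hc : res.contains x = true
    · rw [hc]
      simp only [if_true]
      rw [PySem.Set.add_of_mem ((PySem.Dict.contains_iff_mem_keys res x).mp hc)]
      exact ih res
    · have hc' : res.contains x = false := by revert hc; cases res.contains x <;> simp
      rw [hc']
      simp only [Bool.false_eq_true, if_false]
      rw [ih, PySem.Dict.keys_insert_of_not_contains res _ hc',
        PySem.Set.add_of_not_mem (fun hm =>
          by rw [(PySem.Dict.contains_iff_mem_keys res x).mpr hm] at hc'; cases hc')]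

-- values of B's insert-if-new loop
lemma pvBIns_getD (L0 : List (List String)) :
    ∀ (l : List String) (res : PySem.Dict String Int) (id : String),
      (l.foldl (fun res id => if res.contains id then res else res.insert id (pvRun id L0)) res).getD id 0
        = if res.contains id = false ∧ id ∈ l then pvRun id L0 else res.getD id 0 := by
  intro l
  induction l with
  | nil => intro res id; simp
  | cons x l ih =>
    intro res id
    simp only [List.foldl_cons]
    by_cases hc : res.contains x = true
    · rw [hc]
      simp only [if_true, ih]
      by_cases hid : id = x
      · subst hid; simp [hc]
      · simp [hid]
    · have hc' : res.contains x = false := by revert hc; cases res.contains x <;> simp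
      rw [hc']
      simp only [Bool.false_eq_true, if_false, ih]
      by_cases hid : id = x
      · subst hid
        simp [hc']
      · have hne : (id == x) = false := by simp [hid]
        simp only [PySem.Dict.contains_insert, hne, Bool.false_or,
          PySem.Dict.getD_insert, hid, if_false]
        simp [hid]

-- the invariant-carrying outer induction
lemma pvMainLoop :
    ∀ (L : List (List String)) (c : PySem.Dict String Int)
      (b : PySem.Dict String Bool) (res : PySem.Dict String Int),
      c.keys.Nodup →
      res.keys = c.keys →
      (∀ id, b.getD id false = true → c.contains id = true) →
      (∀ id, c.contains id = true →
        res.getD id 0 = c.getD id 0 + (if b.getD id false = true then 0 else pvRun id L)) →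
      (L.foldl pvAStepL (c, b)).1.items = (pvAltGo L res).items := by
  intro L
  induction L with
  | nil =>
    intro c b res hnc hk hb hv
    simp only [List.foldl_nil, pvAltGo]
    rw [PySem.Dict.items_eq_map_keys c hnc (0 : Int),
      PySem.Dict.items_eq_map_keys res (hk ▸ hnc) (0 : Int), hk]
    apply List.map_congr_left
    intro k hkm
    have hres := hv k ((PySem.Dict.contains_iff_mem_keys c k).mpr hkm)
    simp only [pvRun] at hres
    rw [hres]
    by_cases hbk : b.getD k false = true <;> simp [hbk]
  | cons l rest ih =>
    intro c b res hnc hk hb hv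
    have hbl : ∀ x ∈ l, b.getD x false = true → c.contains x = true := fun x _ h => hb x h
    simp only [List.foldl_cons, pvAltGo]
    have hstep : pvAStepL (c, b) l
        = (l.foldl (fun c x => if !(b.getD x false) then c.insert x (c.getD x 0 + 1) else c) c,
           (l.foldl (fun c x => if !(b.getD x false) then c.insert x (c.getD x 0 + 1) else c) c).keys.foldl
             (fun b instance_id => if instance_id ∉ l then b.insert instance_id true else b) b) := rfl
    rw [hstep]
    set C := l.foldl (fun c x => if !(b.getD x false) then c.insert x (c.getD x 0 + 1) else c) c with hCdef
    set B' := C.keys.foldl (fun b instance_id => if instance_id ∉ l then b.insert instance_id true else b) b with hBdef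
    have hCk : C.keys = PySem.Set.update c.keys l := pvACount_keys b l c hbl
    apply ih
    · rw [hCk]; exact PySem.Set.nodup_update _ _ hnc
    · rw [pvBIns_keys (l :: rest) l res, hCk, hk]
    · intro id h
      rw [hBdef, pvBrokenFold_getD l C.keys b id] at h
      rcases h with ⟨h1, _⟩ | h2
      · exact (PySem.Dict.contains_iff_mem_keys C id).mpr h1
      · rw [PySem.Dict.contains_iff_mem_keys, hCk, PySem.Set.mem_update]
        exact Or.inl ((PySem.Dict.contains_iff_mem_keys c id).mp (hb id h2))
    · intro id hcont
      have hCg : C.getD id 0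
          = c.getD id 0 + (if b.getD id false = true then 0 else (PySem.List.count l id : Int)) :=
        pvACount_getD b l c id
      have hRg := pvBIns_getD (l :: rest) l res id
      have hBg := pvBrokenFold_getD l C.keys b id
      have hrc : res.contains id = c.contains id := by
        rw [PySem.Dict.contains_eq_decide_mem_keys, PySem.Dict.contains_eq_decide_mem_keys, hk]
      by_cases hcid : c.contains id = true
      · rw [hrc, hcid] at hRg
        simp only [Bool.true_eq_false, false_and, if_false] at hRg
        have hres := hv id hcid
        by_cases hbid : b.getD id false = true
        · have hB : B'.getD id false = true := hBg.mpr (Or.inr hbid)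
          rw [hRg, hres, hCg, hB, hbid]
          simp
        · have hbid' : b.getD id false = false := by
            revert hbid; cases b.getD id false <;> simp
          rw [hbid'] at hres hCg
          simp only [Bool.false_eq_true, if_false] at hres hCg
          by_cases hil : id ∈ l
          · have hB : B'.getD id false = false := by
              rw [Bool.eq_false_iff, Ne, hBg]
              rintro (⟨_, h2⟩ | h3)
              · exact h2 hil
              · rw [h3] at hbid'; cases hbid'
            rw [hB]
            simp only [Bool.false_eq_true, if_false]
            rw [hRg, hres, hCg]
            simp only [pvRun, hil, if_true]
            ring
          · have hB : B'.getD id false = true := by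
              rw [hBg]
              exact Or.inl ⟨(PySem.Dict.contains_iff_mem_keys C id).mp hcont, hil⟩
            rw [hB]
            simp only [if_true]
            have hcnt : PySem.List.count l id = 0 := by
              simp [PySem.List.count, List.count_eq_zero, hil]
            rw [hRg, hres, hCg, hcnt]
            simp only [pvRun, hil, if_false]
            ring
      · have hcid' : c.contains id = false := by
          revert hcid; cases c.contains id <;> simp
        have hil : id ∈ l := by
          have := (PySem.Dict.contains_iff_mem_keys C id).mp hcont
          rw [hCk, PySem.Set.mem_update] at this
          rcases this with h1 | h2
          · rw [(PySem.Dict.contains_iff_mem_keys c id).mpr h1] at hcid'; cases hcid'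
          · exact h2
        have hbid' : b.getD id false = false := by
          rw [Bool.eq_false_iff, Ne]
          intro h
          rw [hb id h] at hcid'; cases hcid'
        rw [hrc, hcid'] at hRg
        simp only [hil, and_true, if_true] at hRg
        have hB : B'.getD id false = false := by
          rw [Bool.eq_false_iff, Ne, hBg]
          rintro (⟨_, h2⟩ | h3)
          · exact h2 hil
          · rw [h3] at hbid'; cases hbid'
        rw [hB, hRg, hCg, hbid', PySem.Dict.getD_of_not_contains c 0 hcid']
        simp only [Bool.false_eq_true, if_false, pvRun, hil, if_true]
        ring

-- ===== VERDICT (by name: the statement is the Claim_ definition above) =====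
theorem calc_instance_prefix_hit_count_py_spec : Claim_equal_calc_instance_prefix_hit_count_py := by
  intro prefix_hashes prefix_hash_hit_info _
  unfold Spec_calc_instance_prefix_hit_count_py
  unfold calc_instance_prefix_hit_count_py calc_instance_prefix_hit_count_py_alt
  rw [pvAStep_eq, ← List.foldl_map]
  exact pvMainLoop _ PySem.Dict.empty PySem.Dict.empty PySem.Dict.empty
    (by simp [PySem.Dict.keys_empty])
    rfl
    (fun id h => absurd h (by simp [PySem.Dict.getD_empty]))
    (fun id h => absurd h (by simp [PySem.Dict.contains_empty]))
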